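-- pv_equiv track=rewrite | github.com/RishitTandon7/auto-contributions | daily_contribution_2026-01-08_232849.py | twisted_fibonacci
-- ===== SOURCE A (Python) =====
-- def twisted_fibonacci(n):
--     if n <= 0:
--         return []
--     elif n == 1:
--         return [0] if 0 % 3 == 0 else []
--
--     sequence = []
--     a, b = 0, 1
--     count = 0
--
--     while count < n:
--         if a % 3 == 0:
--             sequence.append(a)
--             count += 1
--         a, b = b, a + b
--     return sequence
-- ===== SOURCE B (Python) =====
-- def twisted_fibonacci(n):
--     # Generate the divisible-by-3 Fibonacci subsequence directly via
--     # G_{k+1} = 7*G_k - G_{k-1}, seeds 0, 3 (never computing skipped terms).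
--     sequence = []
--     x, y = 0, 3
--     count = 0
--     while count < n:
--         sequence.append(x)
--         x, y = y, 7 * y - x
--         count += 1
--     return sequence
-- ===== Notes on version B (the rewrite author's own statement) =====
-- stated objective: faster
-- what changed: B generates the divisible-by-3 Fibonacci subsequence directly via its own recurrence G_{k+1} = 7*G_k - G_{k-1} with seeds 0, 3, looping n times, instead of stepping through every Fibonacci number and filtering by % 3.
import Mathlib
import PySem

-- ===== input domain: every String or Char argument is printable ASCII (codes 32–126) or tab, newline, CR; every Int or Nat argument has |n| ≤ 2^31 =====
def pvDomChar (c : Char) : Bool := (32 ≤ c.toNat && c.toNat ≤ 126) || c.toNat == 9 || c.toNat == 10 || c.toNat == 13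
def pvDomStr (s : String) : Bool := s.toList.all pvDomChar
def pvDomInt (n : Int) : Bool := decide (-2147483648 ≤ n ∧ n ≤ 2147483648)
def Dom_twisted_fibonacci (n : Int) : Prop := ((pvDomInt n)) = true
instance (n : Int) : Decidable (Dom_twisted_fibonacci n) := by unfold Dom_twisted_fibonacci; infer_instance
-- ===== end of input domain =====

-- B replaces A's walk over every Fibonacci number with the recurrence
-- G_{k+1} = 7*G_k - G_{k-1} (seeds 0, 3) that generates exactly the
-- divisible-by-3 Fibonacci subsequence, looping only n times.

-- ===== PORT A =====
-- A's while loop; fuel is only a totality device (4 * n.toNat steps suffice,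
-- since every fourth Fibonacci number is divisible by 3).
def twistedLoopA (fuel : Nat) (n : Int) (seq : List Int) (a b count : Int) : List Int :=
  match fuel with
  | 0 => seq
  | f + 1 =>
    if count < n then
      if a % 3 = 0 then twistedLoopA f n (seq ++ [a]) b (a + b) (count + 1)
      else twistedLoopA f n seq b (a + b) count
    else seq

def twisted_fibonacci (n : Int) : List Int :=
  if n ≤ 0 then []
  else if n = 1 then (if (0 : Int) % 3 = 0 then [0] else [])
  else twistedLoopA (4 * n.toNat) n [] 0 1 0

-- ===== PORT B =====
-- B's while loop; count increments every iteration, so n.toNat fuel is exact.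
def twistedLoopB (fuel : Nat) (n : Int) (seq : List Int) (x y count : Int) : List Int :=
  match fuel with
  | 0 => seq
  | f + 1 =>
    if count < n then twistedLoopB f n (seq ++ [x]) y (7 * y - x) (count + 1)
    else seq

def twisted_fibonacci_alt (n : Int) : List Int :=
  twistedLoopB n.toNat n [] 0 3 0

-- ===== PRECONDITION & SPEC =====
def Spec_twisted_fibonacci (n : Int) (out : List Int) : Prop := out = twisted_fibonacci_alt n
instance (n : Int) (out : List Int) : Decidable (Spec_twisted_fibonacci n out) := by unfold Spec_twisted_fibonacci; infer_instance

-- ===== CLAIM (what is proved, stated in full; the proofs are below) =====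
def Claim_equal_twisted_fibonacci : Prop := ∀ (n : Int), Dom_twisted_fibonacci n → Spec_twisted_fibonacci n (twisted_fibonacci n)

-- ===== LEMMAS AND PROOFS =====

-- Core correspondence: from a state where a is the current divisible-by-3
-- Fibonacci value (a % 3 = 0) and b the next Fibonacci value (b % 3 ≠ 0),
-- four steps of A's loop match one step of B's loop with y = 2*a + 3*b.
theorem twistedLoop_eq (m : Nat) : ∀ (fuelA fuelB : Nat) (n : Int) (seq : List Int) (a b count : Int),
    (n - count).toNat = m → a % 3 = 0 → b % 3 ≠ 0 → 4 * m ≤ fuelA → m ≤ fuelB →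
    twistedLoopA fuelA n seq a b count = twistedLoopB fuelB n seq a (2 * a + 3 * b) count := by
  induction m with
  | zero =>
    intro fuelA fuelB n seq a b count hm _ _ _ _
    have hge : ¬ count < n := by omega
    cases fuelA <;> cases fuelB <;> simp [twistedLoopA, twistedLoopB, hge]
  | succ k ih =>
    intro fuelA fuelB n seq a b count hm ha hb hfa hfb
    have hlt : count < n := by omega
    obtain ⟨fA, rfl⟩ : ∃ f, fuelA = f + 4 := ⟨fuelA - 4, by omega⟩
    obtain ⟨fB, rfl⟩ : ∃ f, fuelB = f + 1 := ⟨fuelB - 1, by omega⟩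
    have hb1 : (a + b) % 3 ≠ 0 := by omega
    have hb2 : (b + (a + b)) % 3 ≠ 0 := by omega
    have hb3' : ((a + b) + (b + (a + b))) % 3 = 0 := by omega
    have stepA : ∀ (f : Nat) (seq : List Int) (a b count : Int),
        twistedLoopA (f + 1) n seq a b count =
          if count < n then
            if a % 3 = 0 then twistedLoopA f n (seq ++ [a]) b (a + b) (count + 1)
            else twistedLoopA f n seq b (a + b) count
          else seq := fun _ _ _ _ _ => rfl
    have stepB : ∀ (f : Nat) (seq : List Int) (x y count : Int),
        twistedLoopB (f + 1) n seq x y count =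
          if count < n then twistedLoopB f n (seq ++ [x]) y (7 * y - x) (count + 1)
          else seq := fun _ _ _ _ _ => rfl
    rw [show fA + 4 = fA + 1 + 1 + 1 + 1 from rfl]
    rw [stepA, if_pos hlt, if_pos ha, stepB, if_pos hlt]
    rcases Nat.eq_zero_or_pos k with hk | hk
    · -- count + 1 = n: the loops exit right after this append
      have hstop : ¬ count + 1 < n := by omega
      rw [stepA, if_neg hstop]
      cases fB <;> simp [twistedLoopB, hstop]
    · -- count + 1 < n: three silent A steps, then recurse via ih
      have hlt1 : count + 1 < n := by omega
      rw [stepA, if_pos hlt1, if_neg hb]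
      rw [stepA, if_pos hlt1, if_neg hb1]
      rw [stepA, if_pos hlt1, if_neg hb2]
      rw [ih fA fB n (seq ++ [a]) ((a + b) + (b + (a + b)))
            ((b + (a + b)) + ((a + b) + (b + (a + b)))) (count + 1)
            (by omega) hb3' (by omega) (by omega) (by omega)]
      rw [show ((a + b) + (b + (a + b)) : Int) = 2 * a + 3 * b from by ring]
      rw [show (2 * (2 * a + 3 * b) + 3 * ((b + (a + b)) + (2 * a + 3 * b)) : Int)
            = 7 * (2 * a + 3 * b) - a from by ring]

theorem twisted_eq (n : Int) : twisted_fibonacci n = twisted_fibonacci_alt n := by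
  unfold twisted_fibonacci twisted_fibonacci_alt
  rcases le_or_gt n 0 with h0 | h0
  · have : n.toNat = 0 := by omega
    simp [h0, this, twistedLoopB]
  · rcases eq_or_ne n 1 with h1 | h1
    · subst h1
      norm_num [twistedLoopB]
    · have h2 : (2 : Int) ≤ n := by omega
      rw [if_neg (by omega), if_neg h1]
      have := twistedLoop_eq n.toNat (4 * n.toNat) n.toNat n [] 0 1 0
        (by omega) (by decide) (by decide) (le_refl _) (le_refl _)
      simpa using this

-- ===== VERDICT (by name: the statement is the Claim_ definition above) =====
theorem twisted_fibonacci_spec : Claim_equal_twisted_fibonacci := by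
  intro n _
  unfold Spec_twisted_fibonacci
  exact twisted_eq n
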